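-- pv_equiv track=rewrite | github.com/TayyabMunir01/Software-for-AD5933-Impedance-Analyzer | guiFunctions.py | get_reg_1
-- ===== SOURCE A (Python) =====
-- def get_reg_1(number):																			# Get Register 1
-- 	if number<=255:
-- 		return 0
--
-- 	if number>255 and number<= 65535:
-- 		return 0
--
-- 	if number>65535 and number<=16777215:
-- 		i = 0
-- 		while number>65535:
-- 		 	number = number - 65536
-- 		 	i = i+1
-- 		return i
-- ===== SOURCE B (Python) =====
-- def get_reg_1(number):
--     if number <= 65535:
--         return 0
--     if number <= 16777215:
--         return number // 65536
--     return None
-- ===== Notes on version B (the rewrite author's own statement) =====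
-- stated objective: simpler
-- what changed: Replaces the repeated-subtraction while loop with the closed form number // 65536 and merges the two 0-returning branches into one comparison.
import Mathlib
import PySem

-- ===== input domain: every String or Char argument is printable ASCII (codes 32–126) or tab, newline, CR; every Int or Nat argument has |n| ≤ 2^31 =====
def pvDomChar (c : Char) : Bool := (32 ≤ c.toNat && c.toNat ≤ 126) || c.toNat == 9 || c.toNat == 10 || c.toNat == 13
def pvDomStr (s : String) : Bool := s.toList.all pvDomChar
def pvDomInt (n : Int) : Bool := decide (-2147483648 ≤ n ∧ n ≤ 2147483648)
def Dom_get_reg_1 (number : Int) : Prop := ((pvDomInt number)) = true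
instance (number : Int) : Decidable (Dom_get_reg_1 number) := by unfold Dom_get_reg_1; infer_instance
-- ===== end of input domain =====

-- B replaces A's repeated-subtraction while loop with the closed form number // 65536 (simpler).

-- ===== PORT A =====
-- while number>65535: number -= 65536; i += 1
def get_reg_1_loop (number : Int) (i : Int) : Int :=
  if h : number > 65535 then get_reg_1_loop (number - 65536) (i + 1) else i
termination_by number.toNat
decreasing_by omega

def get_reg_1 (number : Int) : Option Int :=
  if number ≤ 255 then some 0
  else if number > 255 ∧ number ≤ 65535 then some 0
  else if number > 65535 ∧ number ≤ 16777215 then some (get_reg_1_loop number 0)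
  else none

-- ===== PORT B =====
def get_reg_1_alt (number : Int) : Option Int :=
  if number ≤ 65535 then some 0
  else if number ≤ 16777215 then some (PySem.Int.floordiv number 65536)
  else none

-- ===== PRECONDITION & SPEC =====
def Spec_get_reg_1 (number : Int) (out : Option Int) : Prop := out = get_reg_1_alt number
instance (number : Int) (out : Option Int) : Decidable (Spec_get_reg_1 number out) := by unfold Spec_get_reg_1; infer_instance

-- ===== CLAIM (what is proved, stated in full; the proofs are below) =====
def Claim_equal_get_reg_1 : Prop := ∀ (number : Int), Dom_get_reg_1 number → Spec_get_reg_1 number (get_reg_1 number)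

-- ===== LEMMAS AND PROOFS =====
theorem get_reg_1_loop_eq (number i : Int) (h0 : 0 ≤ number) :
    get_reg_1_loop number i = i + PySem.Int.floordiv number 65536 := by
  induction number, i using get_reg_1_loop.induct with
  | case1 n i hn ih =>
      rw [get_reg_1_loop, dif_pos hn, ih (by omega)]
      have : PySem.Int.floordiv (n - 65536) 65536 = PySem.Int.floordiv n 65536 - 1 := by
        rw [PySem.Int.floordiv_eq_ediv_of_pos (by omega),
            PySem.Int.floordiv_eq_ediv_of_pos (by omega)]
        omega
      rw [this]; ring
  | case2 n i hn =>
      rw [get_reg_1_loop, dif_neg hn]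
      have : PySem.Int.floordiv n 65536 = 0 := by
        rw [PySem.Int.floordiv_eq_ediv_of_pos (by omega)]; omega
      omega

-- ===== VERDICT (by name: the statement is the Claim_ definition above) =====
theorem get_reg_1_spec : Claim_equal_get_reg_1 := by
  intro n _
  unfold Spec_get_reg_1 get_reg_1 get_reg_1_alt
  split_ifs with h1 h2 h3 h4 h5 h6 h7 <;> try (first | rfl | omega)
  · rw [get_reg_1_loop_eq n 0 (by omega)]; ring_nf
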